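-- pv_equiv track=rewrite | github.com/arqiao/mytools | yitang/src/yitang_addon.py | _match_chapter_idx
-- ===== SOURCE A (Python) =====
-- def _match_chapter_idx(chapter, sections):
--     """模糊匹配章节，返回 sections 中的索引。
--     精确匹配 > 包含匹配 > 归入第一个章节。"""
--     if not chapter:
--         return 0
--     # 精确匹配
--     for i, (title, _) in enumerate(sections):
--         if chapter == title:
--             return i
--     # 包含匹配
--     for i, (title, _) in enumerate(sections):
--         if chapter in title or title in chapter:
--             return i
--     return 0
-- ===== SOURCE B (Python) =====
-- def _match_chapter_idx(chapter, sections):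
--     """Single pass: return on exact match, defer first containment index."""
--     if not chapter:
--         return 0
--     contains_idx = None
--     for i, (title, _) in enumerate(sections):
--         if chapter == title:
--             return i
--         if contains_idx is None and (chapter in title or title in chapter):
--             contains_idx = i
--     return contains_idx if contains_idx is not None else 0
-- ===== Notes on version B (the rewrite author's own statement) =====
-- stated objective: simpler
-- what changed: Replaced A's two sequential scans (exact pass, then containment pass) by a single pass that returns immediately on an exact title match while deferring the first containment index in an accumulator.
import Mathlib
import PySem

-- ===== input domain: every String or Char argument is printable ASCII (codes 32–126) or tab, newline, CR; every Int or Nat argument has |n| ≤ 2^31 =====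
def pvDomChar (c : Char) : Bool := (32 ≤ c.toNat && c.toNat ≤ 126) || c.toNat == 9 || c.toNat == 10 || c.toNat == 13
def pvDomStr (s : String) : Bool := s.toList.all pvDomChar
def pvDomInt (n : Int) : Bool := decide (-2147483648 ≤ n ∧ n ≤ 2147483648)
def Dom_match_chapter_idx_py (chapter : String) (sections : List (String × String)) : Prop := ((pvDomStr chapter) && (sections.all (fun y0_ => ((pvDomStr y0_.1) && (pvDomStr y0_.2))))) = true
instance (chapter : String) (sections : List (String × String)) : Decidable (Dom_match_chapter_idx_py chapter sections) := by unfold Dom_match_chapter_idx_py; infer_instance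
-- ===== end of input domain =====

-- B merges A's two scans into a single pass that returns on exact match and defers the first containment index (objective: simpler).


-- ===== PORT A =====
-- first loop of A: exact match scan
def pvAExact (chapter : String) : List (String × String) → Int → Option Int
  | [], _ => none
  | (title, _) :: rest, i =>
    if chapter = title then some i else pvAExact chapter rest (i + 1)

-- second loop of A: containment scan
def pvAContain (chapter : String) : List (String × String) → Int → Option Int
  | [], _ => none
  | (title, _) :: rest, i =>
    if PySem.Str.isIn chapter title || PySem.Str.isIn title chapter then some i
    else pvAContain chapter rest (i + 1)

def match_chapter_idx_py (chapter : String) (sections : List (String × String)) : Int :=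
  if chapter = "" then 0
  else
    match pvAExact chapter sections 0 with
    | some i => i
    | none =>
      match pvAContain chapter sections 0 with
      | some i => i
      | none => 0

-- ===== PORT B =====
-- B's single pass: return on exact match, defer first containment index in acc
def pvBLoop (chapter : String) : List (String × String) → Int → Option Int → Int
  | [], _, acc => acc.getD 0
  | (title, _) :: rest, i, acc =>
    if chapter = title then i
    else
      pvBLoop chapter rest (i + 1)
        (if acc.isNone && (PySem.Str.isIn chapter title || PySem.Str.isIn title chapter)
         then some i else acc)

def match_chapter_idx_py_alt (chapter : String) (sections : List (String × String)) : Int :=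
  if chapter = "" then 0 else pvBLoop chapter sections 0 none

-- ===== PRECONDITION & SPEC =====
def Spec_match_chapter_idx_py (chapter : String) (sections : List (String × String)) (out : Int) : Prop := out = match_chapter_idx_py_alt chapter sections
instance (chapter : String) (sections : List (String × String)) (out : Int) : Decidable (Spec_match_chapter_idx_py chapter sections out) := by unfold Spec_match_chapter_idx_py; infer_instance

-- ===== CLAIM (what is proved, stated in full; the proofs are below) =====
def Claim_equal_match_chapter_idx_py : Prop := ∀ (chapter : String) (sections : List (String × String)), Dom_match_chapter_idx_py chapter sections → Spec_match_chapter_idx_py chapter sections (match_chapter_idx_py chapter sections)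

-- ===== LEMMAS AND PROOFS =====
theorem pvBLoop_eq (chapter : String) (l : List (String × String)) :
    ∀ (i : Int) (acc : Option Int), pvBLoop chapter l i acc =
      match pvAExact chapter l i with
      | some j => j
      | none => acc.getD ((pvAContain chapter l i).getD 0) := by
  induction l with
  | nil => intro i acc; simp [pvBLoop, pvAExact, pvAContain]
  | cons hd rest ih =>
    intro i acc
    obtain ⟨title, body⟩ := hd
    simp only [pvBLoop, pvAExact, pvAContain]
    by_cases hx : chapter = title
    · simp [hx]
    · simp only [hx, if_false, ih]
      cases acc with
      | some k => simp
      | none =>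
        simp only [Option.isNone_none, Bool.true_and]
        by_cases hc : (PySem.Str.isIn chapter title || PySem.Str.isIn title chapter) = true
        · rw [if_pos hc, if_pos hc]
          cases pvAExact chapter rest (i + 1) <;> rfl
        · rw [if_neg hc, if_neg hc]

-- ===== VERDICT (by name: the statement is the Claim_ definition above) =====
theorem match_chapter_idx_py_spec : Claim_equal_match_chapter_idx_py := by
  intro chapter sections _
  unfold Spec_match_chapter_idx_py match_chapter_idx_py match_chapter_idx_py_alt
  by_cases h : chapter = ""
  · simp [h]
  · simp only [h, if_false, pvBLoop_eq]
    cases pvAExact chapter sections 0 <;> cases pvAContain chapter sections 0 <;> simp
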